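-- pv_equiv track=rewrite | github.com/GuiSebax/Calculadora-IEEE-754 | IEEE754Calculator.py | subtractBinary
-- ===== SOURCE A (Python) =====
-- def subtractBinary(bin1: str, bin2: str) -> str:
--     """Subtrai dois numeros binarios em sinal magnitude (OBS: bin1 deve ser maior que bin2 para a subtracao ser feita corretamente)"""
--
--     # Adequando o tamanho dos numeros
--
--     if len(bin1) > len(bin2):
--         bin2 = bin2.zfill(len(bin1))
--     else:
--         bin1 = bin1.zfill(len(bin2))
--
--     result = ""
--
--     carry = 0
--
--     # Subtração feita comparando bit a bit em cada um dos números e utilizando um carry: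
--
--     for i in range(len(bin1) - 1, -1, -1):
--         if bin1[i] == "0" and bin2[i] == "0":
--             if carry == 0:
--                 result = f"0{result}"
--             else:
--                 result = f"1{result}"
--         elif bin1[i] == "1" and bin2[i] == "0":
--             if carry == 0:
--                 result = f"1{result}"
--             else:
--                 result = f"0{result}"
--                 carry = 0
--         elif bin2[i] == "1" and bin1[i] == "0":
--             if carry == 0:
--                 result = f"1{result}"
--                 carry = 1
--             else:
--                 result = f"0{result}"
--                 carry = 1
--         else:
--             if carry == 0:
--                 result = f"0{result}"
--             else:
--                 result = f"1{result}"
--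
--     return result
-- ===== SOURCE B (Python) =====
-- def subtractBinary(bin1: str, bin2: str) -> str:
--     """Subtrai dois numeros binarios em sinal magnitude (resultado modular, como A)."""
--     n = max(len(bin1), len(bin2))
--     if n == 0:
--         return ""
--     b1 = bin1.zfill(n)
--     b2 = bin2.zfill(n)
--     diff = 0
--     for a, b in zip(b1, b2):
--         diff = 2 * diff + (a == "1" and b == "0") - (a == "0" and b == "1")
--     val = diff % (2 ** n)
--     return "".join("01"[(val >> i) & 1] for i in range(n - 1, -1, -1))
-- ===== Notes on version B (the rewrite author's own statement) =====
-- stated objective: alternative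
-- what changed: Replaces the bit-by-bit borrow-propagation loop that builds the result by prepending characters with integer arithmetic: fold the aligned character pairs into one signed integer difference, reduce it modulo 2**n, and emit each result bit by shifting and masking; no borrow logic or per-bit case analysis remains.
import Mathlib
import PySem

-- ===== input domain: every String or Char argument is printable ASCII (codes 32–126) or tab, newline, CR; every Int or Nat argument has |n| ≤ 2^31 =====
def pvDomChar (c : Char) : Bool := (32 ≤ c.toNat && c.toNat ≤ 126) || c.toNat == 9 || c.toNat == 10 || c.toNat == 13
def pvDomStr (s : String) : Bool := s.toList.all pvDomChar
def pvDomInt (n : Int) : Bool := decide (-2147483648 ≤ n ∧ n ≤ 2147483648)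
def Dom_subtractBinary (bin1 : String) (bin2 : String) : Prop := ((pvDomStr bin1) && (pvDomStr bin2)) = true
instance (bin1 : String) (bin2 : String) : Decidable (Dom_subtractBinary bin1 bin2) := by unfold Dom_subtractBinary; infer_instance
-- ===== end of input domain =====

-- B replaces A's bit-by-bit borrow loop by integer arithmetic (fold the pairs into a signed difference, reduce mod 2^n, emit bits); alternative algorithm, same cost.


-- ===== PORT A =====
-- the loop body of A, branch for branch (bin1[i] / bin2[i] via pyGetD; the index is always in range)
def subStep (b1 b2 : List Char) (st : List Char × Int) (i : Int) : List Char × Int :=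
  if PySem.List.pyGetD b1 i ' ' = '0' ∧ PySem.List.pyGetD b2 i ' ' = '0' then
    if st.2 = 0 then ('0' :: st.1, st.2) else ('1' :: st.1, st.2)
  else if PySem.List.pyGetD b1 i ' ' = '1' ∧ PySem.List.pyGetD b2 i ' ' = '0' then
    if st.2 = 0 then ('1' :: st.1, st.2) else ('0' :: st.1, 0)
  else if PySem.List.pyGetD b2 i ' ' = '1' ∧ PySem.List.pyGetD b1 i ' ' = '0' then
    if st.2 = 0 then ('1' :: st.1, (1 : Int)) else ('0' :: st.1, (1 : Int))
  else
    if st.2 = 0 then ('0' :: st.1, st.2) else ('1' :: st.1, st.2)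

-- the result is built by PREPENDING characters (f"0{result}"), kept as a List Char, turned into a String on return
def subtractBinary (bin1 : String) (bin2 : String) : String :=
  let p : String × String :=
    if PySem.Str.len bin1 > PySem.Str.len bin2 then
      (bin1, PySem.Str.zfill bin2 (PySem.Str.len bin1))
    else
      (PySem.Str.zfill bin1 (PySem.Str.len bin2), bin2)
  String.ofList
    ((PySem.List.pyRange (PySem.Str.len p.1 - 1) (-1) (-1)).foldl
      (subStep p.1.toList p.2.toList) ([], 0)).1

-- ===== PORT B =====
-- Python bools in arithmetic ((a == "1" and b == "0") - (a == "0" and b == "1")) are ported as 0/1 if-terms;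
-- "".join of the one-character strings "01"[(val >> i) & 1] is String.ofList of the corresponding characters;
-- 2 ** n and val >> i (n, i ≥ 0 here) are ported with .toNat exponents / shift amounts.
def subtractBinary_alt (bin1 : String) (bin2 : String) : String :=
  let n : Int := max (PySem.Str.len bin1) (PySem.Str.len bin2)
  if n = 0 then ""
  else
    let b1 := PySem.Str.zfill bin1 n
    let b2 := PySem.Str.zfill bin2 n
    let diff := (b1.toList.zip b2.toList).foldl
      (fun v p => 2 * v + ((if p.1 = '1' ∧ p.2 = '0' then (1 : Int) else 0)
                            - (if p.1 = '0' ∧ p.2 = '1' then 1 else 0))) 0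
    let val := PySem.Int.mod diff (2 ^ n.toNat)
    String.ofList
      ((PySem.List.pyRange (n - 1) (-1) (-1)).map
        (fun i => PySem.List.pyGetD "01".toList (PySem.Int.band (val >>> i.toNat) 1) ' '))

-- ===== PRECONDITION & SPEC =====
def Spec_subtractBinary (bin1 : String) (bin2 : String) (out : String) : Prop :=
  out = subtractBinary_alt bin1 bin2

instance (bin1 : String) (bin2 : String) (out : String) : Decidable (Spec_subtractBinary bin1 bin2 out) := by
  unfold Spec_subtractBinary; infer_instance

-- ===== CLAIM (what is proved, stated in full; the proofs are below) =====
def Claim_equal_subtractBinary : Prop :=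
  ∀ (bin1 : String) (bin2 : String), Dom_subtractBinary bin1 bin2 →
    Spec_subtractBinary bin1 bin2 (subtractBinary bin1 bin2)

-- ===== LEMMAS AND PROOFS =====

def bitv (c : Char) : Int := if c = '1' then 1 else 0

-- signed contribution of one aligned pair of characters
def pd (c1 c2 : Char) : Int :=
  (if c1 = '1' ∧ c2 = '0' then 1 else 0) - (if c1 = '0' ∧ c2 = '1' then 1 else 0)

-- B's folded difference (same lambda as the port)
def dsum (q : List (Char × Char)) : Int :=
  q.foldl (fun v p => 2 * v + ((if p.1 = '1' ∧ p.2 = '0' then (1 : Int) else 0)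
                                - (if p.1 = '0' ∧ p.2 = '1' then 1 else 0))) 0

-- the m low-order bits of v, most significant first
def toBits : Int → Nat → List Char
  | _, 0 => []
  | v, m + 1 => toBits (v / 2) m ++ [if v % 2 = 1 then '1' else '0']

-- A's loop body on a pair of characters (the pyGetD lookups already resolved)
def stepP (st : List Char × Int) (p : Char × Char) : List Char × Int :=
  if p.1 = '0' ∧ p.2 = '0' then
    if st.2 = 0 then ('0' :: st.1, st.2) else ('1' :: st.1, st.2)
  else if p.1 = '1' ∧ p.2 = '0' then
    if st.2 = 0 then ('1' :: st.1, st.2) else ('0' :: st.1, 0)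
  else if p.2 = '1' ∧ p.1 = '0' then
    if st.2 = 0 then ('1' :: st.1, (1 : Int)) else ('0' :: st.1, (1 : Int))
  else
    if st.2 = 0 then ('0' :: st.1, st.2) else ('1' :: st.1, st.2)

def outBit (c1 c2 : Char) (cy : Int) : Char :=
  if (pd c1 c2 - cy) % 2 = 1 then '1' else '0'

def outCy (c1 c2 : Char) (cy : Int) : Int :=
  if pd c1 c2 - cy < 0 then 1 else 0

lemma ceq01 : (('0' : Char) = '1') ↔ False := by decide

lemma ceq10 : (('1' : Char) = '0') ↔ False := by decide

lemma emod_neg_one : ((-1 : Int)) % 2 = 1 := by decide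

lemma emod_neg_two : ((-2 : Int)) % 2 = 0 := by decide

lemma pd_mem (c1 c2 : Char) : pd c1 c2 = -1 ∨ pd c1 c2 = 0 ∨ pd c1 c2 = 1 := by
  unfold pd
  split_ifs <;> norm_num

lemma stepP_eq (st : List Char × Int) (c1 c2 : Char) (hc : st.2 = 0 ∨ st.2 = 1) :
    stepP st (c1, c2) = (outBit c1 c2 st.2 :: st.1, outCy c1 c2 st.2) := by
  by_cases h1 : c1 = '0' ∧ c2 = '0'
  · obtain ⟨rfl, rfl⟩ := h1
    rcases hc with hc | hc <;>
      norm_num [stepP, outBit, outCy, pd, hc, ceq01, ceq10, emod_neg_one, emod_neg_two]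
  · by_cases h2 : c1 = '1' ∧ c2 = '0'
    · obtain ⟨rfl, rfl⟩ := h2
      rcases hc with hc | hc <;>
        norm_num [stepP, outBit, outCy, pd, hc, ceq01, ceq10, emod_neg_one, emod_neg_two]
    · by_cases h3 : c2 = '1' ∧ c1 = '0'
      · obtain ⟨rfl, rfl⟩ := h3
        rcases hc with hc | hc <;>
          norm_num [stepP, outBit, outCy, pd, hc, ceq01, ceq10, emod_neg_one, emod_neg_two]
      · have h3' : ¬(c1 = '0' ∧ c2 = '1') := fun h => h3 ⟨h.2, h.1⟩
        have hpd : pd c1 c2 = 0 := by simp [pd, h2, h3']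
        rcases hc with hc | hc <;>
          norm_num [stepP, outBit, outCy, h1, h2, h3, hpd, hc, emod_neg_one]

lemma out_arith (c1 c2 : Char) (cy : Int) (hcy : cy = 0 ∨ cy = 1) :
    pd c1 c2 - cy = bitv (outBit c1 c2 cy) - 2 * outCy c1 c2 cy
      ∧ (outCy c1 c2 cy = 0 ∨ outCy c1 c2 cy = 1)
      ∧ (outBit c1 c2 cy = '0' ∨ outBit c1 c2 cy = '1') := by
  unfold outBit outCy
  rcases pd_mem c1 c2 with h | h | h <;> rw [h] <;> rcases hcy with rfl | rfl <;>
    norm_num [bitv, ceq01, ceq10, emod_neg_one, emod_neg_two]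

lemma dsum_append (q : List (Char × Char)) (p : Char × Char) :
    dsum (q ++ [p]) = 2 * dsum q + pd p.1 p.2 := by
  simp [dsum, pd, List.foldl_append]

lemma loopP (q : List (Char × Char)) : ∀ (st : List Char × Int), (st.2 = 0 ∨ st.2 = 1) →
    ∃ cy, (q.reverse.foldl stepP st) = (toBits (dsum q - st.2) q.length ++ st.1, cy) := by
  induction q using List.reverseRecOn with
  | nil =>
    intro st _
    exact ⟨st.2, by simp [toBits, dsum]⟩
  | append_singleton q p ih =>
    intro st hc
    obtain ⟨c1, c2⟩ := p
    rw [List.reverse_append]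
    simp only [List.reverse_cons, List.reverse_nil, List.nil_append, List.singleton_append,
      List.foldl_cons]
    rw [stepP_eq st c1 c2 hc]
    obtain ⟨harith, hcy', hbit⟩ := out_arith c1 c2 st.2 hc
    obtain ⟨cy', hfold⟩ := ih (outBit c1 c2 st.2 :: st.1, outCy c1 c2 st.2) hcy'
    refine ⟨cy', ?_⟩
    rw [hfold]
    rw [dsum_append, show (q ++ [(c1, c2)]).length = q.length + 1 by simp]
    have hred : toBits (2 * dsum q + pd (c1, c2).1 (c1, c2).2 - st.2) (q.length + 1)
        = toBits ((2 * dsum q + pd (c1, c2).1 (c1, c2).2 - st.2) / 2) q.length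
          ++ [if (2 * dsum q + pd (c1, c2).1 (c1, c2).2 - st.2) % 2 = 1 then '1' else '0'] := rfl
    have hb01 : bitv (outBit c1 c2 st.2) = 0 ∨ bitv (outBit c1 c2 st.2) = 1 := by
      rcases hbit with h | h <;> rw [h] <;> simp [bitv]
    have hpdp : pd (c1, c2).1 (c1, c2).2 = pd c1 c2 := rfl
    have hdiv : (2 * dsum q + pd (c1, c2).1 (c1, c2).2 - st.2) / 2
        = dsum q - outCy c1 c2 st.2 := by rw [hpdp]; omega
    have hmod : (if (2 * dsum q + pd (c1, c2).1 (c1, c2).2 - st.2) % 2 = 1 then '1' else '0')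
        = outBit c1 c2 st.2 := by
      rw [hpdp]
      rcases hbit with h | h
      · have hb0 : bitv (outBit c1 c2 st.2) = 0 := by rw [h]; simp [bitv]
        have hm : (2 * dsum q + pd c1 c2 - st.2) % 2 = 0 := by omega
        rw [hm, h]; simp
      · have hb1' : bitv (outBit c1 c2 st.2) = 1 := by rw [h]; simp [bitv]
        have hm : (2 * dsum q + pd c1 c2 - st.2) % 2 = 1 := by omega
        rw [hm, h]; simp
    rw [hred, hdiv, hmod, List.append_assoc, List.singleton_append]

-- the index loop (pyRange over descending indices) = a loop over the reversed zipped lists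
lemma idx2pair (L1 L2 : List Char) : ∀ (k : Nat), k ≤ L1.length → k ≤ L2.length →
    ∀ (st : List Char × Int),
    (PySem.List.pyRange ((k : Int) - 1) (-1) (-1)).foldl (subStep L1 L2) st
      = ((L1.take k).zip (L2.take k)).reverse.foldl stepP st := by
  intro k
  induction k with
  | zero =>
    intro _ _ st
    rw [PySem.List.pyRange_neg_one_eq_nil (by omega)]
    simp
  | succ k ih =>
    intro h1 h2 st
    have hk1 : k < L1.length := h1
    have hk2 : k < L2.length := h2
    have hcast : ((k + 1 : Nat) : Int) - 1 = (k : Int) := by push_cast; ring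
    rw [hcast, PySem.List.pyRange_neg_one_cons (by omega), List.foldl_cons]
    have hstep : subStep L1 L2 st (k : Int) = stepP st (L1[k], L2[k]) := by
      simp only [subStep, stepP]
      rw [PySem.List.pyGetD_eq_getElem L1 ' ' (by omega) (by exact_mod_cast hk1),
        PySem.List.pyGetD_eq_getElem L2 ' ' (by omega) (by exact_mod_cast hk2)]
      exact rfl
    rw [hstep, ih (le_of_lt hk1) (le_of_lt hk2)]
    rw [List.take_add_one, List.take_add_one,
      List.getElem?_eq_getElem hk1, List.getElem?_eq_getElem hk2]
    simp only [Option.toList_some]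
    rw [List.zip_append (by simp [List.length_take]; omega)]
    simp

lemma zfill_of_le (cs : List Char) (w : Int) (h : w ≤ (cs.length : Int)) :
    PySem.Chars.zfill cs w = cs := by
  unfold PySem.Chars.zfill
  rw [if_pos h]

-- characterisation of A: the borrow loop computes the bits of the folded signed difference
lemma A_eq (bin1 bin2 : String) :
    subtractBinary bin1 bin2
      = String.ofList (toBits
          (dsum ((PySem.Chars.zfill bin1.toList ((max bin1.toList.length bin2.toList.length : Nat) : Int)).zip
                 (PySem.Chars.zfill bin2.toList ((max bin1.toList.length bin2.toList.length : Nat) : Int))))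
          (max bin1.toList.length bin2.toList.length)) := by
  simp only [subtractBinary, PySem.Str.len_eq]
  by_cases hgt : (bin2.toList.length : Int) < (bin1.toList.length : Int)
  · have hlt : bin2.toList.length < bin1.toList.length := by exact_mod_cast hgt
    rw [if_pos hgt]
    have hlen2 : (PySem.Str.zfill bin2 ((bin1.toList.length : Nat) : Int)).toList.length
        = bin1.toList.length := by
      rw [PySem.Str.toList_zfill, PySem.Chars.length_zfill]; omega
    rw [idx2pair _ _ bin1.toList.length (le_refl _) hlen2.symm.le]
    rw [List.take_of_length_le (le_refl _), List.take_of_length_le hlen2.le]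
    obtain ⟨cy, hres⟩ := loopP
      (bin1.toList.zip (PySem.Str.zfill bin2 ((bin1.toList.length : Nat) : Int)).toList)
      ([], 0) (Or.inl rfl)
    rw [hres]
    dsimp only
    rw [sub_zero, List.append_nil, List.length_zip, hlen2, Nat.min_self,
      PySem.Str.toList_zfill, Nat.max_eq_left (le_of_lt hlt),
      zfill_of_le bin1.toList _ (le_refl _)]
  · have hle : bin1.toList.length ≤ bin2.toList.length := by omega
    rw [if_neg hgt]
    have hlen1 : (PySem.Str.zfill bin1 ((bin2.toList.length : Nat) : Int)).toList.length
        = bin2.toList.length := by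
      rw [PySem.Str.toList_zfill, PySem.Chars.length_zfill]; omega
    rw [hlen1]
    rw [idx2pair _ _ bin2.toList.length hlen1.symm.le (le_refl _)]
    rw [List.take_of_length_le hlen1.le, List.take_of_length_le (le_refl _)]
    obtain ⟨cy, hres⟩ := loopP
      ((PySem.Str.zfill bin1 ((bin2.toList.length : Nat) : Int)).toList.zip bin2.toList)
      ([], 0) (Or.inl rfl)
    rw [hres]
    dsimp only
    rw [sub_zero, List.append_nil, List.length_zip, hlen1, Nat.min_self,
      PySem.Str.toList_zfill, Nat.max_eq_right hle,
      zfill_of_le bin2.toList _ (le_refl _)]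

lemma shiftInt_eq_div (v : Int) (k : Nat) : v >>> ((k : Int)) = v / ((2 ^ k : Nat) : Int) := by
  rw [Int.shiftRight_natCast_right, Int.shiftRight_eq_div_pow]

lemma div_pow_succ (v : Int) (j : Nat) :
    v / ((2 ^ (j + 1) : Nat) : Int) = (v / 2) / ((2 ^ j : Nat) : Int) := by
  have hp : ((2 ^ (j + 1) : Nat) : Int) = 2 * ((2 ^ j : Nat) : Int) := by push_cast; ring
  rw [hp, Int.ediv_ediv_of_nonneg]; norm_num

-- B's emission map computes toBits
lemma mapBits : ∀ (m : Nat) (v : Int), 0 ≤ v →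
    (PySem.List.pyRange ((m : Int) - 1) (-1) (-1)).map
      (fun i => PySem.List.pyGetD "01".toList (PySem.Int.band (v >>> i.toNat) 1) ' ')
      = toBits v m := by
  intro m
  induction m with
  | zero =>
    intro v _
    rw [PySem.List.pyRange_neg_one_eq_nil (by omega)]
    rfl
  | succ m ih =>
    intro v hv
    have h00 : v >>> ((((0:Int)).toNat : Nat) : Int) = v := by
      rw [show ((0:Int)).toNat = (0:Nat) from rfl, shiftInt_eq_div]
      simp
    have hlow : PySem.List.pyGetD "01".toList (PySem.Int.band (v >>> ((((0:Int)).toNat : Nat) : Int)) 1) ' '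
        = (if v % 2 = 1 then '1' else '0') := by
      rw [h00, PySem.Int.band_one, PySem.Int.mod_eq_emod_of_pos (by norm_num)]
      rcases Int.emod_two_eq v with h | h <;> rw [h] <;> decide
    have hcast : ((m + 1 : Nat) : Int) - 1 = (m : Int) := by push_cast; ring
    rw [hcast, PySem.List.pyRange_neg_one (m : Int) (-1),
      show ((m : Int) - (-1)).toNat = m + 1 by omega, List.range_succ]
    simp only [List.map_append, List.map_map]
    have htail : List.map ((fun i => PySem.List.pyGetD "01".toList (PySem.Int.band (v >>> i.toNat) 1) ' ')
          ∘ fun k : Nat => (m : Int) - (k : Int)) [m] = [if v % 2 = 1 then '1' else '0'] := by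
      simp only [List.map_cons, List.map_nil, Function.comp]
      rw [show (m : Int) - (m : Int) = 0 by ring, hlow]
    have hhead : List.map ((fun i => PySem.List.pyGetD "01".toList (PySem.Int.band (v >>> i.toNat) 1) ' ')
          ∘ fun k : Nat => (m : Int) - (k : Int)) (List.range m) = toBits (v / 2) m := by
      have ih' := ih (v / 2) (by positivity)
      rw [PySem.List.pyRange_neg_one ((m : Int) - 1) (-1),
        show (((m : Int) - 1) - (-1)).toNat = m by omega, List.map_map] at ih'
      rw [← ih']
      apply List.map_congr_left
      intro k hk
      have hkm : k < m := List.mem_range.mp hk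
      simp only [Function.comp]
      have e1 : ((m : Int) - (k : Int)).toNat = (m - 1 - k) + 1 := by omega
      have e2 : ((m : Int) - 1 - (k : Int)).toNat = m - 1 - k := by omega
      rw [e1, e2, shiftInt_eq_div v ((m - 1 - k) + 1), shiftInt_eq_div (v / 2) (m - 1 - k),
        div_pow_succ]
    rw [htail, hhead]
    rfl

lemma toBits_congr : ∀ (m : Nat) (v w : Int), v % 2 ^ m = w % 2 ^ m → toBits v m = toBits w m := by
  intro m
  induction m with
  | zero => intros; rfl
  | succ m ih =>
    intro v w h
    have hdvd : (2 : Int) ∣ 2 ^ (m + 1) := dvd_pow_self 2 (Nat.succ_ne_zero m)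
    have h2 : v % 2 = w % 2 := by
      rw [← Int.emod_emod_of_dvd v hdvd, ← Int.emod_emod_of_dvd w hdvd, h]
    have key : ∀ x : Int, (x / 2) % 2 ^ m = (x % 2 ^ (m + 1)) / 2 % 2 ^ m := by
      intro x
      have hrw : x = x % 2 ^ (m + 1) + 2 * (2 ^ m * (x / 2 ^ (m + 1))) := by
        rw [Int.emod_def]; ring
      conv_lhs => rw [hrw]
      rw [Int.add_mul_ediv_left _ _ (by norm_num : (2:Int) ≠ 0),
        Int.add_mul_emod_self_left]
    have hdiv : (v / 2) % 2 ^ m = (w / 2) % 2 ^ m := by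
      rw [key v, key w, h]
    show toBits (v / 2) m ++ [if v % 2 = 1 then '1' else '0']
        = toBits (w / 2) m ++ [if w % 2 = 1 then '1' else '0']
    rw [ih _ _ hdiv, h2]

-- ===== VERDICT (by name: the statement is the Claim_ definition above) =====
theorem subtractBinary_spec : Claim_equal_subtractBinary := by
  intro bin1 bin2 _
  unfold Spec_subtractBinary
  simp only [subtractBinary_alt, PySem.Str.len_eq]
  have hmax : max ((bin1.toList.length : Int)) ((bin2.toList.length : Int))
      = ((max bin1.toList.length bin2.toList.length : Nat) : Int) := by push_cast; rfl
  rw [hmax]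
  set m : Nat := max bin1.toList.length bin2.toList.length with hm
  by_cases hz : m = 0
  · rw [if_pos (by exact_mod_cast hz)]
    rw [A_eq bin1 bin2, ← hm, hz]
    rfl
  · rw [if_neg (by exact_mod_cast hz)]
    rw [show ((PySem.Str.zfill bin1 ((m : Nat) : Int)).toList.zip
          (PySem.Str.zfill bin2 ((m : Nat) : Int)).toList).foldl
          (fun v p => 2 * v + ((if p.1 = '1' ∧ p.2 = '0' then (1 : Int) else 0)
                                - (if p.1 = '0' ∧ p.2 = '1' then 1 else 0))) 0
        = dsum ((PySem.Chars.zfill bin1.toList ((m : Nat) : Int)).zip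
                (PySem.Chars.zfill bin2.toList ((m : Nat) : Int))) from by
      rw [dsum, PySem.Str.toList_zfill, PySem.Str.toList_zfill]]
    set D : Int := dsum ((PySem.Chars.zfill bin1.toList ((m : Nat) : Int)).zip
        (PySem.Chars.zfill bin2.toList ((m : Nat) : Int))) with hD
    rw [show ((m : Int)).toNat = m by omega]
    have hpow : (0 : Int) < 2 ^ m := by positivity
    rw [PySem.Int.mod_eq_emod_of_pos hpow]
    rw [mapBits m (D % 2 ^ m) (Int.emod_nonneg D (by positivity))]
    rw [toBits_congr m (D % 2 ^ m) D (Int.emod_emod_of_dvd D dvd_rfl)]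
    rw [A_eq bin1 bin2, ← hm]
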